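-- pv_equiv track=rewrite | github.com/sami-ennedoui/TIPE-SpaceFillingCurves | benchmarks/complexite_tri.py | scan_order
-- ===== SOURCE A (Python) =====
-- def scan_order(colors):
--     sorted_colors = sorted(colors, key=lambda c: (c[0], c[1], c[2]))
--     scan_ordered = []
--     for i in range(0, len(sorted_colors), 8):
--         row = sorted_colors[i:i+8]
--         if (i // 8) % 2 == 0:
--             scan_ordered.extend(row)
--         else:
--             scan_ordered.extend(row[::-1])
--     return scan_ordered
-- ===== SOURCE B (Python) =====
-- def scan_order(colors):
--     out = []
--     rest = sorted(colors)
--     flip = False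
--     while rest:
--         chunk, rest = rest[:8], rest[8:]
--         out.extend(reversed(chunk) if flip else chunk)
--         flip = not flip
--     return out
-- ===== Notes on version B (the rewrite author's own statement) =====
-- stated objective: simpler
-- what changed: Instead of an index loop over range(0,n,8) that slices the sorted list by position and derives each chunk's direction from (i//8)%2, B consumes the sorted list destructively (split off the first 8, keep the rest) while toggling a direction flag, so no index or parity arithmetic remains.
import Mathlib
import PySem

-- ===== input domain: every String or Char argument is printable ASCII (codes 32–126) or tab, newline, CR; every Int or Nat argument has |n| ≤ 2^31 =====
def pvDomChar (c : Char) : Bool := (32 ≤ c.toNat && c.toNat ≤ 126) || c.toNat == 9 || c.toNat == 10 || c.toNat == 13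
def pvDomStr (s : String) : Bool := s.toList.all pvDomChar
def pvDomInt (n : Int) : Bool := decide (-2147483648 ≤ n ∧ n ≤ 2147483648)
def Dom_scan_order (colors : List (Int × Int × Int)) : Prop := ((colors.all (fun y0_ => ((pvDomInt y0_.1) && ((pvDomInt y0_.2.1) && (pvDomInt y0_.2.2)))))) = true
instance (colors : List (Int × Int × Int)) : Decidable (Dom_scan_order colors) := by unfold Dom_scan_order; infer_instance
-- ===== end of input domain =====

-- B replaces A's index loop (slices at i, chunk direction from (i//8)%2) by destructive
-- consumption of the sorted list with a toggled direction flag: simpler, no index arithmetic.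

-- ===== PORT A =====
-- Python tuple comparison is lexicographic; the sort key is encoded exactly with Prod.Lex (toLex).
def scan_order (colors : List (Int × Int × Int)) : List (Int × Int × Int) :=
  let sorted_colors := PySem.List.sorted colors (fun c => toLex (c.1, toLex (c.2.1, c.2.2))) false
  (PySem.List.pyRange 0 (sorted_colors.length : Int) 8).foldl
    (fun scan_ordered i =>
      let row := PySem.List.slice sorted_colors (some i) (some (i + 8))
      if PySem.Int.mod (PySem.Int.floordiv i 8) 2 == 0 then
        scan_ordered ++ row
      else
        scan_ordered ++ ((PySem.List.slice? row none none (-1)).getD []))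
    []

-- ===== PORT B =====
-- the while loop of Source B: split off the first 8, emit them (reversed if flip), continue on the rest
def scanGo : List (Int × Int × Int) → Bool → List (Int × Int × Int)
  | [], _ => []
  | x :: t, flip =>
      (if flip then ((x :: t).take 8).reverse else (x :: t).take 8) ++ scanGo ((x :: t).drop 8) (!flip)
termination_by xs _ => xs.length
decreasing_by simp

def scan_order_alt (colors : List (Int × Int × Int)) : List (Int × Int × Int) :=
  scanGo (PySem.List.sorted colors (fun c => toLex (c.1, toLex (c.2.1, c.2.2))) false) false

-- ===== PRECONDITION & SPEC =====
def Spec_scan_order (colors : List (Int × Int × Int)) (out : List (Int × Int × Int)) : Prop := out = scan_order_alt colors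
instance (colors : List (Int × Int × Int)) (out : List (Int × Int × Int)) : Decidable (Spec_scan_order colors out) := by unfold Spec_scan_order; infer_instance

-- ===== CLAIM (what is proved, stated in full; the proofs are below) =====
def Claim_equal_scan_order : Prop := ∀ (colors : List (Int × Int × Int)), Dom_scan_order colors → Spec_scan_order colors (scan_order colors)

-- ===== LEMMAS AND PROOFS =====

theorem beq_not_left (a b : Bool) : ((!a) == b) = (a == !b) := by
  cases a <;> cases b <;> rfl

theorem decide_succ_mod_two (k : Nat) : decide ((k + 1) % 2 = 0) = !decide (k % 2 = 0) := by
  by_cases h : k % 2 = 0 <;> simp [h] <;> omega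

-- the alternating-chunk flatMap over range equals scanGo, for every starting parity
theorem chunks_eq : ∀ (n : Nat) (s : List (Int × Int × Int)), s.length = n → ∀ (flip : Bool),
    (List.range ((s.length + 7) / 8)).flatMap
      (fun k => if decide (k % 2 = 0) == !flip then (s.drop (8 * k)).take 8
                else ((s.drop (8 * k)).take 8).reverse)
      = scanGo s flip := by
  intro n
  induction n using Nat.strong_induction_on with
  | _ n ih =>
    intro s hs flip
    match s with
    | [] => simp [scanGo]
    | x :: t =>
      have hm : (((x :: t).length + 7) / 8) = (((x :: t).drop 8).length + 7) / 8 + 1 := by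
        simp; omega
      rw [hm, List.range_succ_eq_map, List.flatMap_cons, List.flatMap_map]
      have ht : List.flatMap
          (fun a => (fun k => if decide (k % 2 = 0) == !flip then ((x :: t).drop (8 * k)).take 8
                else (((x :: t).drop (8 * k)).take 8).reverse) (Nat.succ a))
          (List.range ((((x :: t).drop 8).length + 7) / 8))
          = scanGo ((x :: t).drop 8) (!flip) := by
        rw [← ih ((x :: t).drop 8).length (by simp at hs ⊢; omega) ((x :: t).drop 8) rfl (!flip)]
        apply List.flatMap_congr
        intro k _
        simp only [Nat.succ_eq_add_one, decide_succ_mod_two, beq_not_left, Bool.not_not]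
        have hd : (x :: t).drop (8 * (k + 1)) = ((x :: t).drop 8).drop (8 * k) := by
          rw [List.drop_drop]; ring_nf
        rw [hd]
      rw [ht]
      conv_rhs => rw [scanGo]
      cases flip <;> simp

-- the loop of A, on any already-sorted list s, equals scanGo s false
theorem loop_eq (s : List (Int × Int × Int)) :
    (PySem.List.pyRange 0 (s.length : Int) 8).foldl
      (fun scan_ordered i =>
        let row := PySem.List.slice s (some i) (some (i + 8))
        if PySem.Int.mod (PySem.Int.floordiv i 8) 2 == 0 then
          scan_ordered ++ row
        else
          scan_ordered ++ ((PySem.List.slice? row none none (-1)).getD []))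
      []
    = scanGo s false := by
  have hfun : (fun (scan_ordered : List (Int × Int × Int)) (i : Int) =>
        let row := PySem.List.slice s (some i) (some (i + 8))
        if PySem.Int.mod (PySem.Int.floordiv i 8) 2 == 0 then
          scan_ordered ++ row
        else
          scan_ordered ++ ((PySem.List.slice? row none none (-1)).getD []))
      = (fun scan_ordered i => scan_ordered ++
          (if PySem.Int.mod (PySem.Int.floordiv i 8) 2 == 0 then
              PySem.List.slice s (some i) (some (i + 8))
            else (PySem.List.slice s (some i) (some (i + 8))).reverse)) := by
    funext acc i
    simp only [PySem.List.slice?_none_none_neg_one, Option.getD_some]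
    split <;> rfl
  rw [hfun]
  rw [PySem.List.foldl_append_eq_flatMap, List.nil_append]
  rw [PySem.List.pyRange_of_pos 0 (s.length : Int) (by norm_num), List.flatMap_map]
  rw [← chunks_eq s.length s rfl false]
  have hcount : (if (0:Int) < (s.length : Int) then (((s.length : Int) - 0 + 8 - 1) / 8).toNat else 0)
      = (s.length + 7) / 8 := by
    split <;> omega
  rw [hcount]
  apply List.flatMap_congr
  intro k _
  have hi : (0 : Int) + 8 * (k : Int) = ((8 * k : Nat) : Int) := by push_cast; ring
  rw [hi]
  have hslice : PySem.List.slice s (some ((8 * k : Nat) : Int)) (some (((8 * k : Nat) : Int) + 8))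
      = (s.drop (8 * k)).take 8 := by
    have := PySem.List.slice_natCast_add s (8 * k) 8
    simpa using this
  have hcond : (PySem.Int.mod (PySem.Int.floordiv ((8 * k : Nat) : Int) 8) 2 == 0)
      = (decide (k % 2 = 0) == !false) := by
    have h1 : PySem.Int.floordiv ((8 * k : Nat) : Int) 8 = ((k : Nat) : Int) := by
      have h := PySem.Int.floordiv_natCast (8 * k) 8
      rw [Nat.mul_div_cancel_left k (by norm_num : 0 < 8)] at h
      exact_mod_cast h
    have h2 : PySem.Int.mod ((k : Nat) : Int) 2 = ((k % 2 : Nat) : Int) := by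
      exact_mod_cast PySem.Int.mod_natCast k 2
    rw [h1, h2]
    by_cases h : k % 2 = 0 <;> simp [h]
    · omega
  rw [hslice, hcond]

-- ===== VERDICT (by name: the statement is the Claim_ definition above) =====
theorem scan_order_spec : Claim_equal_scan_order := by
  intro colors _
  unfold Spec_scan_order scan_order scan_order_alt
  exact loop_eq _
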